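-- pv_equiv track=rewrite | github.com/cwjng/si568-project3 | scraping/build_rating_posts_csv.py | parse_rating_tags
-- ===== SOURCE A (Python) =====
-- TAG_LABEL_TO_COLUMN = {
--     "Tough Grader": "tough_grader",
--     "Get Ready To Read": "get_ready_to_read",
--     "Participation Matters": "participation_matters",
--     "Extra Credit": "extra_credit",
--     "Group Projects": "group_projects",
--     "Amazing Lectures": "amazing_lectures",
--     "Clear Grading Criteria": "clear_grading_criteria",
--     "Gives Good Feedback": "gives_good_feedback",
--     "Inspirational": "inspirational",
--     "Lots Of Homework": "lots_of_homework",
--     "Hilarious": "hilarious",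
--     "Beware Of Pop Quizzes": "beware_of_pop_quizzes",
--     "So Many Papers": "so_many_papers",
--     "Caring": "caring",
--     "Respected": "respected",
--     "Lecture Heavy": "lecture_heavy",
--     "Test Heavy": "test_heavy",
--     "Graded By Few Things": "graded_by_few_things",
--     "Accessible Outside Class": "accessible_outside_class",
--     "Online Savvy": "online_savvy",
-- }
--
-- TAG_NAME_TO_COLUMN = {
--     " ".join(label.lower().split()): column
--     for label, column in TAG_LABEL_TO_COLUMN.items()
-- }
--
-- def normalize_tag_name(tag_name):
--     return " ".join(tag_name.split()).lower()
--
-- def parse_rating_tags(raw_tags):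
--     values = {column: 0 for column in TAG_LABEL_TO_COLUMN.values()}
--     if not raw_tags:
--         return values
--
--     for tag in raw_tags.split("--"):
--         column = TAG_NAME_TO_COLUMN.get(normalize_tag_name(tag))
--         if column:
--             values[column] = 1
--
--     return values
-- ===== SOURCE B (Python) =====
-- # The known tags, keyed directly by their normalized (lowercase, whitespace-collapsed) names.
-- TAG_NAME_TO_COLUMN = {
--     "tough grader": "tough_grader",
--     "get ready to read": "get_ready_to_read",
--     "participation matters": "participation_matters",
--     "extra credit": "extra_credit",
--     "group projects": "group_projects",
--     "amazing lectures": "amazing_lectures",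
--     "clear grading criteria": "clear_grading_criteria",
--     "gives good feedback": "gives_good_feedback",
--     "inspirational": "inspirational",
--     "lots of homework": "lots_of_homework",
--     "hilarious": "hilarious",
--     "beware of pop quizzes": "beware_of_pop_quizzes",
--     "so many papers": "so_many_papers",
--     "caring": "caring",
--     "respected": "respected",
--     "lecture heavy": "lecture_heavy",
--     "test heavy": "test_heavy",
--     "graded by few things": "graded_by_few_things",
--     "accessible outside class": "accessible_outside_class",
--     "online savvy": "online_savvy",
-- }
--
--
-- def parse_rating_tags(raw_tags):
--     # Reversed traversal: collect the normalized input tokens once, then build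
--     # the result by iterating the fixed known-tag mapping with a membership test.
--     present = {" ".join(t.split()).lower() for t in raw_tags.split("--")}
--     return {column: (1 if name in present else 0)
--             for name, column in TAG_NAME_TO_COLUMN.items()}
-- ===== Notes on version B (the rewrite author's own statement) =====
-- stated objective: alternative
-- what changed: B reverses the traversal: instead of marking a mutable all-zeros dict while looping over input tokens and re-normalizing the label table at import, it keys a literal table by normalized names directly, collects the set of normalized input tokens once, and builds the result dict by iterating the fixed table with a membership test (the empty-string guard is unnecessary and dropped).
import Mathlib
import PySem

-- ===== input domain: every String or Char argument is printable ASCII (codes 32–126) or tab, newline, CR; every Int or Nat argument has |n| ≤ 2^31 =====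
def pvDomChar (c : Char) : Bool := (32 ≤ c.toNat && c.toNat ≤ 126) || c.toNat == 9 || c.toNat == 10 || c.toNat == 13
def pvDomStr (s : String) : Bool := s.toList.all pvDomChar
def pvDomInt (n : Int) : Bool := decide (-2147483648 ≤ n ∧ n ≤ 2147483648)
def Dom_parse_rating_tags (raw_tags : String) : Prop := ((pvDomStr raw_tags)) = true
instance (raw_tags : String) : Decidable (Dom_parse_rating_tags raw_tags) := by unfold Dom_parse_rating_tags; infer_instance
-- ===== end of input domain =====

-- B reverses the traversal: it collects the normalized input tokens once and builds the result
-- by iterating a fixed normalized-name→column table with a membership test (alternative, same cost).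


-- ===== PORT A =====
def tagLabelToColumn : PySem.Dict String String :=
  PySem.Dict.ofList [
    ("Tough Grader", "tough_grader"),
    ("Get Ready To Read", "get_ready_to_read"),
    ("Participation Matters", "participation_matters"),
    ("Extra Credit", "extra_credit"),
    ("Group Projects", "group_projects"),
    ("Amazing Lectures", "amazing_lectures"),
    ("Clear Grading Criteria", "clear_grading_criteria"),
    ("Gives Good Feedback", "gives_good_feedback"),
    ("Inspirational", "inspirational"),
    ("Lots Of Homework", "lots_of_homework"),
    ("Hilarious", "hilarious"),
    ("Beware Of Pop Quizzes", "beware_of_pop_quizzes"),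
    ("So Many Papers", "so_many_papers"),
    ("Caring", "caring"),
    ("Respected", "respected"),
    ("Lecture Heavy", "lecture_heavy"),
    ("Test Heavy", "test_heavy"),
    ("Graded By Few Things", "graded_by_few_things"),
    ("Accessible Outside Class", "accessible_outside_class"),
    ("Online Savvy", "online_savvy")]

def tagNameToColumn : PySem.Dict String String :=
  PySem.Dict.ofList (tagLabelToColumn.items.map
    (fun p => (PySem.Str.join " " (PySem.Str.split₀ (PySem.Str.lower p.1)), p.2)))

def normalize_tag_name (tag_name : String) : String :=
  PySem.Str.lower (PySem.Str.join " " (PySem.Str.split₀ tag_name))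

-- initial dict: {column: 0 for column in TAG_LABEL_TO_COLUMN.values()}
def valuesInit : PySem.Dict String Int :=
  tagLabelToColumn.values.foldl (fun d column => d.insert column 0) PySem.Dict.empty

-- body of A's for-loop (column is truthy iff the lookup hit and the column is non-empty)
def stepA (d : PySem.Dict String Int) (tag : String) : PySem.Dict String Int :=
  match tagNameToColumn.get? (normalize_tag_name tag) with
  | some column => if column == "" then d else d.insert column 1
  | none => d

def parse_rating_tags (raw_tags : String) : List (String × Int) :=
  if raw_tags == "" then valuesInit.items
  else
    -- "--" ≠ "", so split? is always some; getD [] is unreachable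
    let tags := (PySem.Str.split? raw_tags "--").getD []
    (tags.foldl stepA valuesInit).items

-- ===== PORT B =====
-- Source B's literal table: normalized names keyed directly to columns
def knownPairs : List (String × String) := [
    ("tough grader", "tough_grader"),
    ("get ready to read", "get_ready_to_read"),
    ("participation matters", "participation_matters"),
    ("extra credit", "extra_credit"),
    ("group projects", "group_projects"),
    ("amazing lectures", "amazing_lectures"),
    ("clear grading criteria", "clear_grading_criteria"),
    ("gives good feedback", "gives_good_feedback"),
    ("inspirational", "inspirational"),
    ("lots of homework", "lots_of_homework"),
    ("hilarious", "hilarious"),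
    ("beware of pop quizzes", "beware_of_pop_quizzes"),
    ("so many papers", "so_many_papers"),
    ("caring", "caring"),
    ("respected", "respected"),
    ("lecture heavy", "lecture_heavy"),
    ("test heavy", "test_heavy"),
    ("graded by few things", "graded_by_few_things"),
    ("accessible outside class", "accessible_outside_class"),
    ("online savvy", "online_savvy")]

def parse_rating_tags_alt (raw_tags : String) : List (String × Int) :=
  let present : PySem.Set String :=
    PySem.Set.ofList (((PySem.Str.split? raw_tags "--").getD []).map
      (fun t => PySem.Str.lower (PySem.Str.join " " (PySem.Str.split₀ t))))
  (PySem.Dict.ofList (knownPairs.map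
      (fun p => (p.2, if PySem.Set.contains present p.1 then (1 : Int) else 0)))).items

-- ===== PRECONDITION & SPEC =====
def Spec_parse_rating_tags (raw_tags : String) (out : List (String × Int)) : Prop := out = parse_rating_tags_alt raw_tags
instance (raw_tags : String) (out : List (String × Int)) : Decidable (Spec_parse_rating_tags raw_tags out) := by unfold Spec_parse_rating_tags; infer_instance

-- ===== CLAIM (what is proved, stated in full; the proofs are below) =====
def Claim_equal_parse_rating_tags : Prop := ∀ (raw_tags : String), Dom_parse_rating_tags raw_tags → Spec_parse_rating_tags raw_tags (parse_rating_tags raw_tags)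

-- ===== LEMMAS AND PROOFS =====
set_option maxHeartbeats 1000000

lemma ofList_eq {κ ν : Type} [BEq κ] (l : List (κ × ν)) :
    PySem.Dict.ofList l = l.foldl (fun acc p => acc.insert p.1 p.2) PySem.Dict.empty := rfl

-- the generic loop body, abstracted over the (fixed, literal) name→column mapping
def stepG (M : PySem.Dict String String) (d : PySem.Dict String Int) (tag : String) :
    PySem.Dict String Int :=
  match M.get? (normalize_tag_name tag) with
  | some column => if column == "" then d else d.insert column 1
  | none => d

lemma stepA_eq : stepA = stepG tagNameToColumn := rfl

-- facts about the literal tables, all by evaluation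
lemma cols_ne_empty : ∀ p ∈ tagNameToColumn.items, p.2 ≠ "" := by decide
lemma nameMap_keys_nodup : tagNameToColumn.keys.Nodup := by decide
lemma nameMap_vals_nodup : (tagNameToColumn.items.map (·.2)).Nodup := by decide
lemma valuesInit_keys_nodup : valuesInit.keys.Nodup := by decide
lemma valuesInit_keys_eq : valuesInit.keys = tagNameToColumn.items.map (·.2) := by decide
lemma valuesInit_contains : ∀ p ∈ tagNameToColumn.items, valuesInit.contains p.2 = true := by decide
lemma valuesInit_getD : ∀ p ∈ tagNameToColumn.items, valuesInit.getD p.2 0 = 0 := by decide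
lemma knownPairs_eq : knownPairs = tagNameToColumn.items := by decide

-- a column determines its (unique) key in the mapping
lemma get?_eq_some_iff (M : PySem.Dict String String)
    (hkeys : M.keys.Nodup) (hvals : (M.items.map (·.2)).Nodup)
    (n c : String) (hm : (n, c) ∈ M.items) (m : String) :
    M.get? m = some c ↔ m = n := by
  constructor
  · intro h
    have hmc := PySem.Dict.mem_items_of_get?_eq_some M h
    have := List.inj_on_of_nodup_map hvals hmc hm rfl
    exact congrArg Prod.fst this
  · intro h; subst h
    exact PySem.Dict.get?_of_mem_items M hm hkeys

lemma foldl_stepG_keys (M : PySem.Dict String String)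
    (hne : ∀ p ∈ M.items, p.2 ≠ "") :
    ∀ (ts : List String) (d : PySem.Dict String Int),
    (∀ p ∈ M.items, d.contains p.2 = true) →
    (ts.foldl (stepG M) d).keys = d.keys := by
  intro ts
  induction ts with
  | nil => intro d _; rfl
  | cons t ts ih =>
    intro d hd
    rw [List.foldl_cons]
    cases h : M.get? (normalize_tag_name t) with
    | none => rw [show stepG M d t = d by simp only [stepG]; rw [h]]; exact ih d hd
    | some col =>
      have hmem := PySem.Dict.mem_items_of_get?_eq_some M h
      have hcol : col ≠ "" := hne _ hmem
      have hstep : stepG M d t = d.insert col 1 := by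
        simp only [stepG]; rw [h]; simp [hcol]
      rw [hstep]
      have hc : d.contains col = true := hd _ hmem
      rw [ih _ (by
        intro p hp
        rw [PySem.Dict.contains_insert]
        simp [hd p hp])]
      exact PySem.Dict.keys_insert_of_contains d 1 hc

lemma foldl_stepG_getD (M : PySem.Dict String String)
    (hne : ∀ p ∈ M.items, p.2 ≠ "") :
    ∀ (ts : List String) (d : PySem.Dict String Int) (c : String),
    (ts.foldl (stepG M) d).getD c 0 =
      if ts.any (fun t => M.get? (normalize_tag_name t) == some c)
      then 1 else d.getD c 0 := by
  intro ts
  induction ts with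
  | nil => intro d c; simp
  | cons t ts ih =>
    intro d c
    rw [List.foldl_cons, ih]
    by_cases hts : ts.any (fun t => M.get? (normalize_tag_name t) == some c) = true
    · simp [hts]
    · simp only [List.any_cons, hts, Bool.or_false]
      cases h : M.get? (normalize_tag_name t) with
      | none => rw [show stepG M d t = d by simp only [stepG]; rw [h]]; simp
      | some col =>
        have hcol : col ≠ "" := hne _ (PySem.Dict.mem_items_of_get?_eq_some M h)
        have hstep : stepG M d t = d.insert col 1 := by
          simp only [stepG]; rw [h]; simp [hcol]
        rw [hstep, PySem.Dict.getD_insert]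
        by_cases hc : c = col
        · subst hc; simp
        · simp [hc, Ne.symm hc]

-- the loop's hit condition for a column is membership of its name in the normalized-token set
lemma cond_eq (M : PySem.Dict String String)
    (hkeys : M.keys.Nodup) (hvals : (M.items.map (·.2)).Nodup)
    (ts : List String) (p : String × String) (hp : p ∈ M.items) :
    (ts.any fun t => M.get? (normalize_tag_name t) == some p.2)
      = PySem.Set.contains (PySem.Set.ofList (ts.map normalize_tag_name)) p.1 := by
  have hp' : (p.1, p.2) ∈ M.items := by simpa using hp
  rw [Bool.eq_iff_iff]
  simp only [List.any_eq_true, PySem.Set.contains_iff, PySem.Set.mem_ofList, List.mem_map,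
    beq_iff_eq]
  constructor
  · rintro ⟨t, ht, htc⟩
    exact ⟨t, ht, (get?_eq_some_iff M hkeys hvals p.1 p.2 hp' _).mp htc⟩
  · rintro ⟨t, ht, htn⟩
    exact ⟨t, ht, (get?_eq_some_iff M hkeys hvals p.1 p.2 hp' (normalize_tag_name t)).mpr htn⟩

-- the two result lists agree for ANY token list (generic over the tables)
lemma main_generic (M : PySem.Dict String String) (v0 : PySem.Dict String Int)
    (hne : ∀ p ∈ M.items, p.2 ≠ "")
    (hkeys : M.keys.Nodup) (hvals : (M.items.map (·.2)).Nodup)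
    (hv0nodup : v0.keys.Nodup) (hv0keys : v0.keys = M.items.map (·.2))
    (hv0contains : ∀ p ∈ M.items, v0.contains p.2 = true)
    (hv0getD : ∀ p ∈ M.items, v0.getD p.2 0 = 0)
    (ts : List String) :
    (ts.foldl (stepG M) v0).items =
      (PySem.Dict.ofList (M.items.map
        (fun p => (p.2, if PySem.Set.contains (PySem.Set.ofList (ts.map normalize_tag_name)) p.1
                        then (1 : Int) else 0)))).items := by
  -- right-hand side: fresh distinct keys, so ofList keeps the list as given
  have hrhs : (PySem.Dict.ofList (M.items.map
        (fun p => (p.2, if PySem.Set.contains (PySem.Set.ofList (ts.map normalize_tag_name)) p.1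
                        then (1 : Int) else 0)))).items
      = M.items.map
        (fun p => (p.2, if PySem.Set.contains (PySem.Set.ofList (ts.map normalize_tag_name)) p.1
                        then (1 : Int) else 0)) := by
    rw [ofList_eq, PySem.Dict.items_foldl_insert_fresh _ Prod.fst Prod.snd _ (by simp) (by
      rw [List.map_map]
      exact hvals)]
    have h1 : (PySem.Dict.empty : PySem.Dict String Int).items = [] := rfl
    rw [h1, List.nil_append, List.map_map]
    exact List.map_congr_left (fun a _ => rfl)
  rw [hrhs]
  -- left-hand side: items via keys + getD
  have hk : (ts.foldl (stepG M) v0).keys = v0.keys :=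
    foldl_stepG_keys M hne ts v0 hv0contains
  rw [PySem.Dict.items_eq_map_keys _ (by rw [hk]; exact hv0nodup) 0, hk,
      hv0keys, List.map_map]
  apply List.map_congr_left
  intro p hp
  simp only [Function.comp_apply]
  rw [foldl_stepG_getD M hne, cond_eq M hkeys hvals ts p hp, hv0getD p hp]

-- instantiation at the literal tables
lemma main_lemma (ts : List String) :
    (ts.foldl stepA valuesInit).items =
      (PySem.Dict.ofList (tagNameToColumn.items.map
        (fun p => (p.2, if PySem.Set.contains (PySem.Set.ofList (ts.map normalize_tag_name)) p.1
                        then (1 : Int) else 0)))).items := by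
  rw [stepA_eq]
  exact main_generic tagNameToColumn valuesInit cols_ne_empty nameMap_keys_nodup
    nameMap_vals_nodup valuesInit_keys_nodup valuesInit_keys_eq valuesInit_contains
    valuesInit_getD ts

-- ===== VERDICT (by name: the statement is the Claim_ definition above) =====
theorem parse_rating_tags_spec : Claim_equal_parse_rating_tags := by
  intro raw _hdom
  unfold Spec_parse_rating_tags parse_rating_tags parse_rating_tags_alt
  by_cases h : raw = ""
  · subst h; decide
  · rw [if_neg (by simpa using h)]
    rw [main_lemma, knownPairs_eq]
    rfl
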